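-- pv_equiv track=rewrite | github.com/AndyNg555/hashiing | hash-function-project/src/simple_hash.py | show_collisions
-- ===== SOURCE A (Python) =====
-- def simple_hash(key: str) -> int:
--
--     return sum(ord(char) for char in str(key)) % 10
--
-- def show_collisions(keys: list) -> dict:
--
--     groups = {}
--     for key in keys:
--         h = simple_hash(key)
--         if h not in groups:
--             groups[h] = []
--         groups[h].append(key)
--     return groups
-- ===== SOURCE B (Python) =====
-- def simple_hash(key: str) -> int:
--     return sum(ord(char) for char in str(key)) % 10
--
-- def show_collisions(keys: list) -> dict:
--     # Two declarative passes: compute all hashes once, then for each distinct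
--     # hash (in first-occurrence order) gather its keys by filtering.
--     hs = [simple_hash(k) for k in keys]
--     return {h: [k for k, g in zip(keys, hs) if g == h] for h in dict.fromkeys(hs)}
-- ===== Notes on version B (the rewrite author's own statement) =====
-- stated objective: alternative
-- what changed: replaced the incremental dict-building loop (check membership, create empty list, append) by a declarative two-pass construction: map keys to hashes once, dedup the hash list for first-occurrence order, and build each group by a filter comprehension over the zipped (key, hash) pairs
import Mathlib
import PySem

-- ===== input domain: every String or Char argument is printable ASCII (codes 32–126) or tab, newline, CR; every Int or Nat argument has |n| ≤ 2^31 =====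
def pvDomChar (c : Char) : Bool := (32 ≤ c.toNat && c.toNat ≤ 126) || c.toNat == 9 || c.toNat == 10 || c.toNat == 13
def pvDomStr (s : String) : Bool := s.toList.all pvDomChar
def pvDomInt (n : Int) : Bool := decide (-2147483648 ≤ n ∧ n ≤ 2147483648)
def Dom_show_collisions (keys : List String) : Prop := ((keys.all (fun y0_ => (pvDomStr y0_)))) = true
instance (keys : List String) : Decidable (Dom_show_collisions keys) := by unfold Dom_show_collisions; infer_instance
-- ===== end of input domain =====

-- B replaces A's incremental dict-building loop by a declarative construction (hash list once,
-- dedup for first-occurrence order, filter per hash); objective: alternative decomposition, same result.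


-- ===== PORT A =====
-- simple_hash: sum(ord(char) for char in str(key)) % 10  (helper identical in both Pythons; shared)
def simple_hash (key : String) : Int :=
  PySem.Int.mod ((key.toList.map (fun c => (c.toNat : Int))).sum) 10

-- for key in keys: h = simple_hash(key); if h not in groups: groups[h] = []; groups[h].append(key)
def show_collisions (keys : List String) : List (Int × List String) :=
  (keys.foldl (fun (groups : PySem.Dict Int (List String)) key =>
      let h := simple_hash key
      let groups := if groups.contains h then groups else groups.insert h []
      groups.modify h [] (fun l => l ++ [key]))
    PySem.Dict.empty).items

-- ===== PORT B =====
-- hs = [simple_hash(k) for k in keys]; {h: [k for k, g in zip(keys, hs) if g == h] for h in dict.fromkeys(hs)}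
def show_collisions_alt (keys : List String) : List (Int × List String) :=
  let hs := keys.map simple_hash
  (PySem.List.dedup hs).map (fun h =>
    (h, ((keys.zip hs).filter (fun p => p.2 == h)).map (fun p => p.1)))

-- ===== PRECONDITION & SPEC =====
def Spec_show_collisions (keys : List String) (out : List (Int × List String)) : Prop := out = show_collisions_alt keys
instance (keys : List String) (out : List (Int × List String)) : Decidable (Spec_show_collisions keys out) := by unfold Spec_show_collisions; infer_instance

-- ===== CLAIM (what is proved, stated in full; the proofs are below) =====
def Claim_equal_show_collisions : Prop := ∀ (keys : List String), Dom_show_collisions keys → Spec_show_collisions keys (show_collisions keys)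

-- ===== LEMMAS AND PROOFS =====

lemma modify_eq_insert (e : PySem.Dict Int (List String)) (k : Int) (f : List String → List String) :
    e.modify k [] f = e.insert k (f (e.getD k [])) := rfl

-- re-inserting a key just added overwrites in place: same as a single insert when the key was fresh
lemma insert_insert_self (d : PySem.Dict Int (List String)) (h : Int) (v w : List String)
    (hc : d.contains h = false) : (d.insert h v).insert h w = d.insert h w := by
  apply PySem.Dict.ext
  rw [PySem.Dict.items_insert, PySem.Dict.contains_insert_self,
      PySem.Dict.items_insert_of_not_contains _ _ hc,
      PySem.Dict.items_insert_of_not_contains _ _ hc]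
  simp only [if_true, List.map_append]
  congr 1
  · conv_rhs => rw [← List.map_id d.items]
    apply List.map_congr_left
    intro p hp
    have hph : (p.1 == h) = false := by
      rw [beq_eq_false_iff_ne]
      intro e
      have := PySem.Dict.mem_keys_of_mem_items _ hp
      rw [e, ← PySem.Dict.contains_iff_mem_keys] at this
      simp [hc] at this
    simp [hph]
  · simp

-- A's loop body (ensure key present, then append) is exactly d[k] = d.get(k, []) + [key]
lemma step_eq_modify (d : PySem.Dict Int (List String)) (key : String) :
    (let h := simple_hash key
     let groups := if d.contains h then d else d.insert h []
     groups.modify h [] (fun l => l ++ [key]))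
    = d.modify (simple_hash key) [] (fun l => l ++ [key]) := by
  show ((if d.contains (simple_hash key) then d else d.insert (simple_hash key) []).modify
      (simple_hash key) [] (fun l => l ++ [key])) = _
  by_cases hc : d.contains (simple_hash key)
  · rw [if_pos hc]
  · simp only [Bool.not_eq_true] at hc
    rw [if_neg (by simp [hc]), modify_eq_insert, modify_eq_insert,
        PySem.Dict.getD_insert_self, PySem.Dict.getD_of_not_contains _ _ hc]
    exact insert_insert_self d _ _ _ hc

-- a Nodup-keyed dict is its key list paired with its getD values
lemma items_eq_keys_map (d : PySem.Dict Int (List String)) (h : d.keys.Nodup) :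
    d.items = d.keys.map (fun k => (k, d.getD k [])) := by
  have hk : d.keys = d.items.map (fun p => p.1) := by simp only [PySem.Dict.keys]
  rw [hk, List.map_map]
  conv_lhs => rw [← List.map_id d.items]
  apply List.map_congr_left
  intro p hp
  obtain ⟨k, v⟩ := p
  have := PySem.Dict.getD_of_mem_items d hp h []
  simp [this]

lemma zip_map_self (keys : List String) :
    keys.zip (keys.map simple_hash) = keys.map (fun k => (k, simple_hash k)) := by
  induction keys with
  | nil => rfl
  | cons k ks ih => simp [ih]

-- ===== VERDICT (by name: the statement is the Claim_ definition above) =====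
theorem show_collisions_spec : Claim_equal_show_collisions := by
  intro keys _
  unfold Spec_show_collisions show_collisions show_collisions_alt
  have hfun : (fun (groups : PySem.Dict Int (List String)) key =>
      let h := simple_hash key
      let groups := if groups.contains h then groups else groups.insert h []
      groups.modify h [] (fun l => l ++ [key]))
      = fun d k => d.modify (simple_hash k) [] (fun l => l ++ [k]) :=
    funext fun d => funext fun k => step_eq_modify d k
  rw [hfun]
  have hmap : keys.foldl (fun d k => d.modify (simple_hash k) [] (fun l => l ++ [k])) PySem.Dict.empty
      = (keys.map (fun k => (simple_hash k, k))).foldl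
          (fun d p => d.modify p.1 [] (fun x => x ++ [p.2])) PySem.Dict.empty := by
    rw [List.foldl_map]
  rw [hmap]
  set pairs := keys.map (fun k => (simple_hash k, k)) with hpairs
  set D := pairs.foldl (fun d p => d.modify p.1 [] (fun x => x ++ [p.2])) PySem.Dict.empty with hD
  have hkeys : D.keys = PySem.Set.ofList (keys.map simple_hash) := by
    rw [hD, PySem.Dict.keys_foldl_modify_key pairs Prod.fst [] (fun _ p => fun x => x ++ [p.2])]
    simp only [hpairs, List.map_map, PySem.Set.update, PySem.Set.ofList,
      PySem.Dict.keys_empty, PySem.Set.empty, Function.comp_def]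
  have hnodup : D.keys.Nodup := by
    rw [hkeys]; exact PySem.Set.nodup_ofList _
  rw [items_eq_keys_map D hnodup, hkeys]
  simp only [PySem.List.dedup_eq_ofList]
  apply List.map_congr_left
  intro h _
  have hget := PySem.Dict.getD_foldl_modify_append pairs PySem.Dict.empty h
  rw [← hD] at hget
  rw [hget, zip_map_self]
  simp [hpairs, List.filter_map, List.map_map, Function.comp_def]
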